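-- pv_equiv track=rewrite | github.com/VictorDeGallegos/Complejidad-Computacional | practicas/Practica2/clanes.py | existenDosClanes
-- ===== SOURCE A (Python) =====
-- import copy
-- from queue import Queue
--
-- def esBipartitaAux(G, fuente, color):
--     color[fuente] = 1
--
--     # Creamos una cola con los valores de los vértices,
--     # partiendo del vértice "fuente" para poder realizar
--     # BFS sobre la gráfica.
--     q = Queue()
--     q.put(fuente)
--
--     while (not q.empty()):
--         # Sacamos un vértice de la cola.
--         u = q.get()
--
--         # Obtenemos los vértices vecinos no coloreados.
--         for v in G:
--             # Si v es vecino de u y no esta coloreado, entonces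
--             # le asignamos el color alterno y lo agregamos a la
--             # cola.
--             if (G[u][v] and color[v] == -1):
--                 color[v] = 1 - color[u]
--                 q.put(v)
--
--             # Si v es vecino de u y tiene el mismo color, entonces
--             # la gráfica no es bipartita.
--             elif (G[u][v] and color[v] == color[u]):
--                 return False
--
--     # Si la cola se vacía, entonces todos los vértices tienen
--     # colores alternos con sus vecinos, por lo tanto, la gráfica
--     # es bipartita.
--     return True
--
-- def esBipartita(G):
--
--     # Creamos un diccionario de colores para almacenar los
--     # colores asignados a los vértices. Los valores de los
--     # vértices son usados como las llaves del diccionario.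
--     # El valor '-1' del diccionario de colores es usado para
--     # indicar que no hay un colo asignado al vértice. El
--     # valor '1' del diccionario es usado para indicar que se
--     # asignó el primero color y el '0' es usado para indicar
--     # que se asignó el segundo color.
--     color = dict()
--     for i in G:
--         color[i] = -1
--
--     # Revisamos cada uno de los vértices no coloreados.
--     for i in G:
--         if (color[i] == -1):
--             if (esBipartitaAux(G, i, color) == False):
--                 return False
--
--     return True
--
-- def existenDosClanes(G):
--     v = len(G)
--
--     # Obtenemos el complemento de G para revisar si es una
--     # gráfica bipartita.
--     # Consideramos todos los valores del diccionario, menos los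
--     # que se traten de un vértice conectado consigo mismo G[i][i].
--     C = copy.deepcopy(G)
--     for u in C:
--         for v in C:
--             C[u][v] = None
--
--     for i in G:
--         for j in G:
--             C[i][j] = not G[i][j] if i != j else 0
--
--     return esBipartita(C)
-- ===== SOURCE B (Python) =====
-- def existenDosClanes(G):
--     # Union-find ("quick-find" with class relabeling) over the parity constraints
--     # of the complement graph: every complement edge (i, j) forces i and j into
--     # opposite color classes; bipartite iff no constraint conflict arises.
--     keys = list(G)
--     comp = {}
--     for v in keys:
--         comp[v] = (v, 0)          # each vertex starts as its own class, parity 0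
--     for i in keys:
--         for j in keys:
--             if i != j and not G[i][j]:     # (i, j) is an edge of the complement
--                 ri, pi = comp[i]
--                 rj, pj = comp[j]
--                 if ri == rj:
--                     if pi == pj:           # forced into the same class: conflict
--                         return False
--                 else:
--                     d = (pi + pj + 1) % 2  # flip so that j ends opposite to i
--                     for v in keys:
--                         rv, pv = comp[v]
--                         if rv == rj:
--                             comp[v] = (ri, (pv + d) % 2)
--     return True
-- ===== Notes on version B (the rewrite author's own statement) =====
-- stated objective: alternative
-- what changed: B drops the deepcopy/complement-dict construction and the queue-based BFS 2-coloring entirely and instead runs a parity union-find (quick-find with whole-class relabeling) over the complement edges read directly off G, reporting a conflict exactly when two endpoints of a complement edge are forced into the same color class.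
-- outside the precondition, e.g. on existenDosClanes({0: {0: 0, 1: 1}, 1: {0: 0, 1: 0}}): A returns False, B returns True
import Mathlib
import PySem

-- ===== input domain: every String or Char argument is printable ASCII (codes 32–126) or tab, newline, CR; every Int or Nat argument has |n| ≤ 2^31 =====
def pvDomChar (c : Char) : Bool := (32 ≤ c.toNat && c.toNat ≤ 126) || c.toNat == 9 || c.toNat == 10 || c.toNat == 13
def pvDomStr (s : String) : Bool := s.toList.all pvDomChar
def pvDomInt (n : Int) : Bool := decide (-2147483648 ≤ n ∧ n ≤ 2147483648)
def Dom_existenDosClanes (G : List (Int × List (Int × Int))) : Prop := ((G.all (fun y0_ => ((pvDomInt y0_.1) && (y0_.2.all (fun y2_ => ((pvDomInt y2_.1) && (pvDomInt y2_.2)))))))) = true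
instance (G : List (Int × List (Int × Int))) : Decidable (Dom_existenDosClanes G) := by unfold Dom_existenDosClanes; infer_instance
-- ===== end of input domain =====

-- B replaces A's BFS 2-coloring of an explicitly built complement dict by a union-find
-- (quick-find with parity relabeling) over the complement's parity constraints (objective:
-- alternative algorithm, similar cost). Equivalence is proved on symmetric adjacency dicts
-- whose rows cover all vertices (Pre_); return value only, neither version mutates G.

-- the Python dict-of-dicts value of the input (type-convention decode, shared by both ports)
def pvToDict (G : List (Int × List (Int × Int))) : PySem.Dict Int (PySem.Dict Int Int) :=
  PySem.Dict.ofList (G.map (fun p => (p.1, PySem.Dict.ofList p.2)))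

-- ===== PORT A =====

-- inner `for v in G` loop of esBipartitaAux (returns none on Python's `return False`)
def pvAuxInner (C : PySem.Dict Int (PySem.Dict Int Int)) (u : Int)
    (vs : List Int) (color : PySem.Dict Int Int) (q : List Int) :
    Option (PySem.Dict Int Int × List Int) :=
  match vs with
  | [] => some (color, q)
  | v :: rest =>
    let cuv := (C.getD u PySem.Dict.empty).getD v 0
    if cuv ≠ 0 ∧ color.getD v 0 = -1 then
      pvAuxInner C u rest (color.insert v (1 - color.getD u 0)) (q ++ [v])
    else if cuv ≠ 0 ∧ color.getD v 0 = color.getD u 0 then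
      none
    else pvAuxInner C u rest color q

-- `while (not q.empty())` loop; fuel only makes the recursion structural — it is chosen
-- (pvAuxFuel) strictly above the measure |q| + 2·#uncolored, which the loop decreases, so
-- the fuel = 0 branch is never reached on any run (see pvA_auxLoop_spec).
def pvAuxLoop (C : PySem.Dict Int (PySem.Dict Int Int)) (ks : List Int)
    (color : PySem.Dict Int Int) (q : List Int) (fuel : Nat) :
    Bool × PySem.Dict Int Int :=
  match fuel with
  | 0 => (true, color)
  | fuel + 1 =>
    match q with
    | [] => (true, color)
    | u :: q' =>
      match pvAuxInner C u ks color q' with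
      | none => (false, color)
      | some (c', q'') => pvAuxLoop C ks c' q'' fuel

def pvAuxFuel (ks : List Int) : Nat := 2 * ks.length + 2

def pvEsBipartitaAux (C : PySem.Dict Int (PySem.Dict Int Int)) (fuente : Int)
    (color : PySem.Dict Int Int) : Bool × PySem.Dict Int Int :=
  let color := color.insert fuente 1
  pvAuxLoop C C.keys color [fuente] (pvAuxFuel C.keys)

-- `for i in G: if color[i] == -1: …` loop of esBipartita, threading the mutated color dict
def pvEsBipartitaLoop (C : PySem.Dict Int (PySem.Dict Int Int)) (ks : List Int)
    (color : PySem.Dict Int Int) : Bool :=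
  match ks with
  | [] => true
  | i :: rest =>
    if color.getD i 0 = -1 then
      match pvEsBipartitaAux C i color with
      | (false, _) => false
      | (true, c') => pvEsBipartitaLoop C rest c'
    else pvEsBipartitaLoop C rest color

def pvEsBipartita (C : PySem.Dict Int (PySem.Dict Int Int)) : Bool :=
  let color := C.keys.foldl (fun c i => c.insert i (-1 : Int)) PySem.Dict.empty
  pvEsBipartitaLoop C C.keys color

def existenDosClanes (G : List (Int × List (Int × Int))) : Bool :=
  let _v : Int := (G.length : Int)            -- v = len(G) (shadowed below in the Python, unused)
  let C0 := pvToDict G                        -- C = copy.deepcopy(G)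
  -- for u in C: for v in C: C[u][v] = None   (None is overwritten below before any read; modeled as 0)
  let C1 := C0.keys.foldl (fun C u => C0.keys.foldl
      (fun C v => C.insert u ((C.getD u PySem.Dict.empty).insert v 0)) C) C0
  -- for i in G: for j in G: C[i][j] = not G[i][j] if i != j else 0   (True/False as 1/0)
  let D := pvToDict G
  let C2 := D.keys.foldl (fun C i => D.keys.foldl
      (fun C j => C.insert i ((C.getD i PySem.Dict.empty).insert j
        (if i ≠ j then (if (D.getD i PySem.Dict.empty).getD j 0 = 0 then 1 else 0) else 0))) C) C1
  pvEsBipartita C2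

-- ===== PORT B =====

-- inner `for j in keys` loop (none on Python's `return False`)
def pvAltLoopJ (D : PySem.Dict Int (PySem.Dict Int Int)) (ks : List Int) (i : Int)
    (js : List Int) (comp : PySem.Dict Int (Int × Int)) :
    Option (PySem.Dict Int (Int × Int)) :=
  match js with
  | [] => some comp
  | j :: rest =>
    if i ≠ j ∧ (D.getD i PySem.Dict.empty).getD j 0 = 0 then
      let ri := (comp.getD i (0, 0)).1
      let pi := (comp.getD i (0, 0)).2
      let rj := (comp.getD j (0, 0)).1
      let pj := (comp.getD j (0, 0)).2
      if ri = rj then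
        (if pi = pj then none else pvAltLoopJ D ks i rest comp)
      else
        let d := PySem.Int.mod (pi + pj + 1) 2
        pvAltLoopJ D ks i rest (ks.foldl (fun c v =>
          if (c.getD v (0, 0)).1 = rj then c.insert v (ri, PySem.Int.mod ((c.getD v (0, 0)).2 + d) 2) else c) comp)
    else pvAltLoopJ D ks i rest comp

def pvAltLoopI (D : PySem.Dict Int (PySem.Dict Int Int)) (ks : List Int)
    (is : List Int) (comp : PySem.Dict Int (Int × Int)) :
    Option (PySem.Dict Int (Int × Int)) :=
  match is with
  | [] => some comp
  | i :: rest =>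
    match pvAltLoopJ D ks i ks comp with
    | none => none
    | some c' => pvAltLoopI D ks rest c'

def existenDosClanes_alt (G : List (Int × List (Int × Int))) : Bool :=
  let D := pvToDict G
  let ks := D.keys
  let comp0 := ks.foldl (fun c v => c.insert v ((v, 0) : Int × Int)) PySem.Dict.empty
  match pvAltLoopI D ks ks comp0 with
  | none => false
  | some _ => true

-- ===== PRECONDITION & SPEC =====

-- the adjacency value G[i][j] read off the raw association lists
-- (Python dict semantics: last occurrence of a duplicated key wins; default 0)
def pvRawAdj (G : List (Int × List (Int × Int))) (i j : Int) : Int :=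
  ((((G.lookup i).getD []).reverse.lookup j).getD 0)

-- Pre_ excludes (a) inputs whose rows miss another vertex's key (Python raises KeyError
-- building the complement), (b) association lists with duplicate outer keys (not a valid
-- encoding of a Python dict), and (c) asymmetric adjacency dicts, on which A's answer is an
-- accident of BFS edge direction (the function is about undirected graphs; see claim cites).
def Pre_existenDosClanes (G : List (Int × List (Int × Int))) : Prop :=
  (G.map Prod.fst).Nodup ∧
  (∀ p ∈ G, ∀ k ∈ G.map Prod.fst, k ≠ p.1 → k ∈ p.2.map Prod.fst) ∧
  (∀ i ∈ G.map Prod.fst, ∀ j ∈ G.map Prod.fst, i ≠ j →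
    (pvRawAdj G i j = 0 ↔ pvRawAdj G j i = 0))

instance (G : List (Int × List (Int × Int))) : Decidable (Pre_existenDosClanes G) := by
  unfold Pre_existenDosClanes; infer_instance

def pvWitness_existenDosClanes : (List (Int × List (Int × Int))) :=
  [(0, [(0, 0), (1, 1)]), (1, [(0, 1), (1, 0)])]

def Spec_existenDosClanes (G : List (Int × List (Int × Int))) (out : Bool) : Prop := out = existenDosClanes_alt G
instance (G : List (Int × List (Int × Int))) (out : Bool) : Decidable (Spec_existenDosClanes G out) := by unfold Spec_existenDosClanes; infer_instance

-- ===== CLAIM (what is proved, stated in full; the proofs are below) =====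
def Claim_equal_existenDosClanes : Prop := ∀ (G : List (Int × List (Int × Int))), Dom_existenDosClanes G → Pre_existenDosClanes G → Spec_existenDosClanes G (existenDosClanes G)

-- ===== LEMMAS AND PROOFS =====

-- ---- the abstract graph both programs decide bipartiteness of ----

-- edge of the complement graph on the key set
def pvEdg (G : List (Int × List (Int × Int))) (i j : Int) : Prop :=
  i ∈ G.map Prod.fst ∧ j ∈ G.map Prod.fst ∧ i ≠ j ∧ pvRawAdj G i j = 0

-- parity-tagged walks in the complement graph
inductive pvWk (G : List (Int × List (Int × Int))) : Int → Int → Bool → Prop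
  | nil (v : Int) : pvWk G v v false
  | cons {a b c : Int} {p : Bool} : pvEdg G a b → pvWk G b c p → pvWk G a c (!p)

-- the complement graph is 2-colorable
def pvBip (G : List (Int × List (Int × Int))) : Prop :=
  ∃ f : Int → Bool, ∀ i j, pvEdg G i j → f i ≠ f j

theorem pvEdg_symm {G} (hp : Pre_existenDosClanes G) {i j} (h : pvEdg G i j) : pvEdg G j i := by
  obtain ⟨hi, hj, hne, ha⟩ := h
  exact ⟨hj, hi, Ne.symm hne, ((hp.2.2 i hi j hj hne).1 ha)⟩

theorem pvWk_trans {G a b c p q} (h1 : pvWk G a b p) (h2 : pvWk G b c q) : pvWk G a c (p ^^ q) := by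
  induction h1 with
  | nil v => simpa using h2
  | cons e _ ih =>
    have := pvWk.cons e (ih h2)
    simpa [Bool.xor_comm, Bool.xor_assoc] using this

theorem pvWk_symm {G} (hp : Pre_existenDosClanes G) {a b p} (h : pvWk G a b p) : pvWk G b a p := by
  induction h with
  | nil v => exact pvWk.nil v
  | cons e w ih =>
    have hba : pvWk G _ _ (!false) := pvWk.cons (pvEdg_symm hp e) (pvWk.nil _)
    have := pvWk_trans ih hba
    simpa using this

theorem pvWk_color {G} {f : Int → Bool} (hf : ∀ i j, pvEdg G i j → f i ≠ f j)
    {a b : Int} {p : Bool} (h : pvWk G a b p) : f a = (f b ^^ p) := by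
  induction h with
  | nil v => simp
  | @cons x y z q e w ih =>
    have hne := hf _ _ e
    have hx : f x = !(f y) := by
      cases hfa : f x <;> cases hfb : f y <;> simp_all
    rw [hx, ih]
    cases f z <;> cases q <;> simp

theorem pvBip_no_odd {G v} (hb : pvBip G) (h : pvWk G v v true) : False := by
  obtain ⟨f, hf⟩ := hb
  have := pvWk_color hf h
  simp at this

-- two same-parity walks to a common root plus an edge give an odd closed walk
theorem pvOdd_of_conflict {G} (hp : Pre_existenDosClanes G) {u w r : Int} {p : Bool}
    (hu : pvWk G u r p) (hw : pvWk G w r p) (he : pvEdg G u w) : pvWk G u u true := by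
  have huw : pvWk G u w (p ^^ p) := pvWk_trans hu (pvWk_symm hp hw)
  have h2 : pvWk G w u true := by simpa using pvWk.cons (pvEdg_symm hp he) (pvWk.nil u)
  have := pvWk_trans huw h2
  simpa using this

-- ---- association-list / Dict bridging ----

theorem pvMk_get? {τ : Type} (l : List (Int × τ)) (x : Int) :
    (PySem.Dict.mk l).get? x = l.lookup x := by
  induction l with
  | nil => rfl
  | cons p rest ih =>
    obtain ⟨k, v⟩ := p
    rw [PySem.Dict.get?_mk_cons]
    simp only [List.lookup]
    by_cases h : x = k
    · subst h; simp
    · have h1 : (k == x) = false := by simp [Ne.symm h]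
      have h2 : (x == k) = false := by simp [h]
      rw [h1, h2]; simpa using ih

theorem pvOfList_items {τ : Type} (l : List (Int × τ)) (h : (l.map Prod.fst).Nodup) :
    (PySem.Dict.ofList l).items = l := by
  have := PySem.Dict.items_foldl_insert_fresh (ν := τ) l Prod.fst Prod.snd PySem.Dict.empty
    (by intro a _; simp) h
  simpa [PySem.Dict.ofList, PySem.Dict.update] using this

theorem pvOfList_get? {τ : Type} (l : List (Int × τ)) (h : (l.map Prod.fst).Nodup) (x : Int) :
    (PySem.Dict.ofList l).get? x = l.lookup x := by
  have hi := pvOfList_items l h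
  have : PySem.Dict.ofList l = PySem.Dict.mk l := PySem.Dict.ext hi
  rw [this, pvMk_get?]

theorem pvLookup_map {τ : Type} (G : List (Int × List (Int × Int))) (f : List (Int × Int) → τ) (i : Int) :
    (G.map (fun p => (p.1, f p.2))).lookup i = (G.lookup i).map f := by
  induction G with
  | nil => rfl
  | cons p rest ih =>
    simp only [List.map, List.lookup]
    by_cases h : i = p.1
    · simp [h]
    · have : (i == p.1) = false := by simp [h]
      rw [this]; simpa using ih

-- key list of the decoded dict
theorem pvKeys_toDict (G : List (Int × List (Int × Int))) (h : (G.map Prod.fst).Nodup) :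
    (pvToDict G).keys = G.map Prod.fst := by
  have h' : ((G.map (fun p => (p.1, PySem.Dict.ofList p.2))).map Prod.fst).Nodup := by
    simpa using h
  have hi := pvOfList_items _ h'
  simp only [pvToDict, PySem.Dict.keys, hi]
  simp

theorem pvToDict_getD (G : List (Int × List (Int × Int))) (h : (G.map Prod.fst).Nodup) (i : Int) :
    (pvToDict G).getD i PySem.Dict.empty
      = ((G.lookup i).map PySem.Dict.ofList).getD PySem.Dict.empty := by
  have h' : ((G.map (fun p => (p.1, PySem.Dict.ofList p.2))).map Prod.fst).Nodup := by
    simpa using h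
  rw [PySem.Dict.getD_eq_get?_getD, pvToDict, pvOfList_get? _ h', pvLookup_map]

-- the adjacency reads both ports perform agree with pvRawAdj
-- Python-dict lookup of a raw row: the LAST occurrence of a key wins (no Nodup needed)
theorem pvOfList_get?_rev {τ : Type} (r : List (Int × τ)) (x : Int) :
    (PySem.Dict.ofList r).get? x = r.reverse.lookup x := by
  induction r using List.reverseRecOn with
  | nil => rfl
  | append_singleton r p ih =>
    have hfold : PySem.Dict.ofList (r ++ [p]) = (PySem.Dict.ofList r).insert p.1 p.2 := by
      simp [PySem.Dict.ofList, PySem.Dict.update]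
    rw [hfold, List.reverse_append]
    simp only [List.reverse_cons, List.reverse_nil, List.nil_append, List.singleton_append,
      List.lookup, PySem.Dict.get?_insert]
    by_cases h : x = p.1
    · simp [h]
    · have hb : (x == p.1) = false := by simp [h]
      rw [hb, if_neg h]
      exact ih

theorem pvAdjD_eq_rawAdj (G : List (Int × List (Int × Int))) (hp : Pre_existenDosClanes G) (i j : Int) :
    ((pvToDict G).getD i PySem.Dict.empty).getD j 0 = pvRawAdj G i j := by
  rw [pvToDict_getD G hp.1]
  unfold pvRawAdj
  cases hl : G.lookup i with
  | none => simp [PySem.Dict.getD_empty]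
  | some r =>
    simp only [Option.map_some, Option.getD_some]
    rw [PySem.Dict.getD_eq_get?_getD, pvOfList_get?_rev]

-- ---- generic insert-loop lemmas ----

theorem pvFoldInsert_getD {τ : Type} (js : List Int) (g : Int → τ) (r0 : PySem.Dict Int τ)
    (d0 : τ) (v : Int) :
    (js.foldl (fun r j => r.insert j (g j)) r0).getD v d0
      = if v ∈ js then g v else r0.getD v d0 := by
  induction js generalizing r0 with
  | nil => simp
  | cons j rest ih =>
    simp only [List.foldl, ih, PySem.Dict.getD_insert, List.mem_cons]
    by_cases hv : v ∈ rest
    · simp [hv]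
    · by_cases hj : v = j <;> simp [hv, hj]

-- one row-rewriting inner pass: other rows untouched, row i gets g on js
theorem pvInnerPass_getD_ne (js : List Int) (i : Int) (g : Int → Int)
    (C : PySem.Dict Int (PySem.Dict Int Int)) (u : Int) (hu : u ≠ i) :
    (js.foldl (fun C j => C.insert i ((C.getD i PySem.Dict.empty).insert j (g j))) C).getD u PySem.Dict.empty
      = C.getD u PySem.Dict.empty := by
  induction js generalizing C with
  | nil => rfl
  | cons j rest ih => simp [List.foldl, ih, PySem.Dict.getD_insert, hu]

theorem pvInnerPass_getD_self (js : List Int) (i : Int) (g : Int → Int)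
    (C : PySem.Dict Int (PySem.Dict Int Int)) (v : Int) :
    ((js.foldl (fun C j => C.insert i ((C.getD i PySem.Dict.empty).insert j (g j))) C).getD i PySem.Dict.empty).getD v 0
      = if v ∈ js then g v else (C.getD i PySem.Dict.empty).getD v 0 := by
  induction js generalizing C with
  | nil => simp
  | cons j rest ih =>
    simp only [List.foldl, ih, PySem.Dict.getD_insert, List.mem_cons]
    by_cases hv : v ∈ rest
    · simp [hv]
    · by_cases hj : v = j
      · simp [hj]
      · simp only [if_neg hv, if_neg (show ¬(v = j ∨ v ∈ rest) by tauto)]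
        simp [PySem.Dict.getD_insert, hj]

theorem pvInnerPass_keys (js : List Int) (i : Int) (g : Int → Int)
    (C : PySem.Dict Int (PySem.Dict Int Int)) (hi : C.contains i = true) :
    (js.foldl (fun C j => C.insert i ((C.getD i PySem.Dict.empty).insert j (g j))) C).keys = C.keys := by
  induction js generalizing C with
  | nil => rfl
  | cons j rest ih =>
    simp only [List.foldl]
    rw [ih _ (by rw [PySem.Dict.contains_insert]; simp),
        PySem.Dict.keys_insert_of_contains _ _ hi]

theorem pvPass_keys (is js : List Int) (g : Int → Int → Int)
    (C : PySem.Dict Int (PySem.Dict Int Int)) (h : ∀ i ∈ is, C.contains i = true) :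
    (is.foldl (fun C i => js.foldl (fun C j => C.insert i ((C.getD i PySem.Dict.empty).insert j (g i j))) C) C).keys = C.keys := by
  induction is generalizing C with
  | nil => rfl
  | cons i rest ih =>
    simp only [List.foldl]
    rw [ih]
    · exact pvInnerPass_keys js i (g i) C (h i (by simp))
    · intro a ha
      have : (js.foldl (fun C j => C.insert i ((C.getD i PySem.Dict.empty).insert j (g i j))) C).keys = C.keys :=
        pvInnerPass_keys js i (g i) C (h i (by simp))
      rw [PySem.Dict.contains_iff_mem_keys, this, ← PySem.Dict.contains_iff_mem_keys]
      exact h a (by simp [ha])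

theorem pvPass_row_ne (is js : List Int) (g : Int → Int → Int)
    (C : PySem.Dict Int (PySem.Dict Int Int)) (u : Int) (hu : u ∉ is) :
    (is.foldl (fun C i => js.foldl (fun C j => C.insert i ((C.getD i PySem.Dict.empty).insert j (g i j))) C) C).getD u PySem.Dict.empty
      = C.getD u PySem.Dict.empty := by
  induction is generalizing C with
  | nil => rfl
  | cons i rest ih =>
    simp only [List.foldl]
    rw [ih _ (fun h => hu (by simp [h])),
        pvInnerPass_getD_ne js i (g i) C u (fun h => hu (by simp [h]))]

theorem pvPass_getD (is js : List Int) (g : Int → Int → Int)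
    (C : PySem.Dict Int (PySem.Dict Int Int)) (u v : Int) (hnd : is.Nodup)
    (hu : u ∈ is) (hv : v ∈ js) :
    ((is.foldl (fun C i => js.foldl (fun C j => C.insert i ((C.getD i PySem.Dict.empty).insert j (g i j))) C) C).getD u PySem.Dict.empty).getD v 0
      = g u v := by
  induction is generalizing C with
  | nil => simp at hu
  | cons i rest ih =>
    simp only [List.foldl]
    rcases List.mem_cons.mp hu with rfl | hu'
    · have hnr : u ∉ rest := by simpa using (List.nodup_cons.mp hnd).1
      rw [pvPass_row_ne rest js g _ u hnr, pvInnerPass_getD_self, if_pos hv]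
    · exact ih _ (List.nodup_cons.mp hnd).2 hu'

-- ---- A side: BFS 2-coloring is a bipartiteness decision ----

def pvK (G : List (Int × List (Int × Int))) : List Int := G.map Prod.fst

def pvCol (c : PySem.Dict Int Int) (v : Int) : Int := c.getD v 0

def pvCnt (G : List (Int × List (Int × Int))) (c : PySem.Dict Int Int) : Nat :=
  (pvK G).countP (fun v => decide (pvCol c v = -1))

-- every colored vertex has already had all its complement edges checked
def pvSettled (G : List (Int × List (Int × Int))) (c : PySem.Dict Int Int) : Prop :=
  ∀ v ∈ pvK G, pvCol c v ≠ -1 →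
    (pvCol c v = 0 ∨ pvCol c v = 1) ∧
    ∀ w, pvEdg G v w → pvCol c w ≠ -1 ∧ pvCol c w ≠ pvCol c v

-- adjacency characterization of the dict the loops read edges from
def pvAdjOk (G : List (Int × List (Int × Int))) (C : PySem.Dict Int (PySem.Dict Int Int)) : Prop :=
  ∀ a b, a ∈ pvK G → b ∈ pvK G →
    (((C.getD a PySem.Dict.empty).getD b 0 ≠ 0) ↔ (a ≠ b ∧ pvRawAdj G a b = 0))

theorem pvEdg_of_adj {G C} (hC : pvAdjOk G C) {a b} (ha : a ∈ pvK G) (hb : b ∈ pvK G)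
    (h : (C.getD a PySem.Dict.empty).getD b 0 ≠ 0) : pvEdg G a b := by
  obtain ⟨hne, hz⟩ := (hC a b ha hb).mp h
  exact ⟨ha, hb, hne, hz⟩

theorem pvCountP_lt {l : List Int} {p p' : Int → Bool}
    (hle : ∀ x, p' x = true → p x = true) {v}
    (hv : v ∈ l) (hp : p v = true) (hp' : p' v = false) : l.countP p' < l.countP p := by
  induction l with
  | nil => simp at hv
  | cons a rest ih =>
    rcases List.mem_cons.mp hv with rfl | hv'
    · have h1 : rest.countP p' ≤ rest.countP p := List.countP_mono_left (fun x _ => hle x)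
      have e1 : (v :: rest).countP p' = rest.countP p' := by simp [hp']
      have e2 : (v :: rest).countP p = rest.countP p + 1 := by simp [hp]
      omega
    · have h2 := ih hv'
      have h3 : (if p' a then 1 else 0) ≤ (if p a then 1 else 0) := by
        by_cases h : p' a = true
        · simp [h, hle a h]
        · simp at h
          simp only [h, Bool.false_eq_true, if_false]
          omega
      simp only [List.countP_cons]
      omega

theorem pvCnt_insert_lt {G c v x} (hv : v ∈ pvK G) (hc : pvCol c v = -1) (hx : x ≠ -1) :
    pvCnt G (c.insert v x) < pvCnt G c := by
  refine pvCountP_lt (fun y hy => ?_) hv (by simp [hc]) (by simp [pvCol, hx])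
  simp only [decide_eq_true_eq] at *
  by_cases hyv : y = v
  · subst hyv; simp [pvCol] at hy; exact absurd hy hx
  · simpa [pvCol, PySem.Dict.getD_insert, hyv] using hy

theorem pvCol_insert_self {c : PySem.Dict Int Int} {v x} : pvCol (c.insert v x) v = x := by
  simp [pvCol]

theorem pvCol_insert_ne {c : PySem.Dict Int Int} {v x w} (h : w ≠ v) :
    pvCol (c.insert v x) w = pvCol c w := by
  simp [pvCol, PySem.Dict.getD_insert, h]

-- the inner `for v in G` pass, successful case
theorem pvAuxInner_some {G C} (hC : pvAdjOk G C) {u} (hu : u ∈ pvK G) :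
    ∀ (vs : List Int) (c : PySem.Dict Int Int) (q : List Int) c2 q2,
    (∀ x ∈ vs, x ∈ pvK G) →
    (pvCol c u = 0 ∨ pvCol c u = 1) →
    pvAuxInner C u vs c q = some (c2, q2) →
    (∀ v, pvCol c v ≠ -1 → pvCol c2 v = pvCol c v) ∧
    (∀ v ∈ q, v ∈ q2) ∧
    (∀ v, pvCol c v = -1 → pvCol c2 v ≠ -1 →
      (v ∈ q2 ∧ v ∈ pvK G ∧ pvCol c2 v = 1 - pvCol c u ∧ pvEdg G u v)) ∧
    (∀ v ∈ q2, v ∈ q ∨ (pvCol c v = -1 ∧ pvCol c2 v ≠ -1)) ∧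
    (∀ w ∈ vs, pvEdg G u w → (pvCol c2 w ≠ -1 ∧ pvCol c2 w ≠ pvCol c u)) ∧
    (q2.length + 2 * pvCnt G c2 ≤ q.length + 2 * pvCnt G c) := by
  intro vs
  induction vs with
  | nil =>
    intro c q c2 q2 _ _ h
    simp only [pvAuxInner, Option.some.injEq, Prod.mk.injEq] at h
    obtain ⟨rfl, rfl⟩ := h
    exact ⟨fun v _ => rfl, fun v h => h, fun v h1 h2 => absurd h1 h2, fun v hv => Or.inl hv, by simp, le_refl _⟩
  | cons v rest ih =>
    intro c q c2 q2 hvs hcu h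
    have hvK : v ∈ pvK G := hvs v (by simp)
    have hrest : ∀ x ∈ rest, x ∈ pvK G := fun x hx => hvs x (by simp [hx])
    simp only [pvAuxInner] at h
    by_cases h1 : (C.getD u PySem.Dict.empty).getD v 0 ≠ 0 ∧ c.getD v 0 = -1
    · rw [if_pos h1] at h
      have hcv : pvCol c v = -1 := h1.2
      have hvu : v ≠ u := fun he => by
        rw [he] at hcv; rcases hcu with h' | h' <;> rw [h'] at hcv <;> exact absurd hcv (by norm_num)
      have hedg : pvEdg G u v := pvEdg_of_adj hC hu hvK h1.1
      set c' := c.insert v (1 - c.getD u 0) with hc'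
      have hcu' : pvCol c' u = pvCol c u := pvCol_insert_ne (Ne.symm hvu)
      have hcv' : pvCol c' v = 1 - pvCol c u := pvCol_insert_self
      have hne1 : (1 : Int) - pvCol c u ≠ -1 := by rcases hcu with h' | h' <;> rw [h'] <;> norm_num
      have hcv'ne : pvCol c' v ≠ -1 := by rw [hcv']; exact hne1
      obtain ⟨ia, ib, ic, id, ie, imu⟩ :=
        ih c' (q ++ [v]) c2 q2 hrest (by rw [hcu']; exact hcu) h
      have hpres : ∀ x, pvCol c x ≠ -1 → pvCol c' x = pvCol c x := by
        intro x hx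
        by_cases hxv : x = v
        · subst hxv; exact absurd hcv hx
        · exact pvCol_insert_ne hxv
      refine ⟨?_, ?_, ?_, ?_, ?_, ?_⟩
      · intro x hx; rw [ia x (by rw [hpres x hx]; exact hx), hpres x hx]
      · intro x hx; exact ib x (by simp [hx])
      · intro x hx1 hx2
        by_cases hxv : x = v
        · subst hxv
          refine ⟨ib _ (by simp), hvK, ?_, hedg⟩
          rw [ia _ hcv'ne, hcv']
        · have hcx' : pvCol c' x = pvCol c x := pvCol_insert_ne hxv
          have := ic x (by rw [hcx']; exact hx1) hx2
          rw [hcu'] at this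
          exact ⟨this.1, this.2.1, this.2.2.1, this.2.2.2⟩
      · intro x hx
        rcases id x hx with hq | ⟨hnew1, hnew2⟩
        · rcases List.mem_append.mp hq with h' | h'
          · exact Or.inl h'
          · simp at h'; subst h'; exact Or.inr ⟨hcv, by rw [ia _ hcv'ne]; exact hcv'ne⟩
        · by_cases hxv : x = v
          · subst hxv; exact Or.inr ⟨hcv, hnew2⟩
          · have hee : pvCol c' x = pvCol c x := pvCol_insert_ne hxv
            exact Or.inr ⟨by rw [← hee]; exact hnew1, hnew2⟩
      · intro w hw hedgw
        rcases List.mem_cons.mp hw with rfl | hw'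
        · constructor
          · rw [ia w hcv'ne]; exact hcv'ne
          · rw [ia w hcv'ne, hcv']
            rcases hcu with h' | h' <;> rw [h'] <;> norm_num
        · have := ie w hw' hedgw; rw [hcu'] at this; exact this
      · have hcnt : pvCnt G c' < pvCnt G c := pvCnt_insert_lt hvK hcv hne1
        simp only [List.length_append, List.length_cons, List.length_nil] at imu ⊢
        omega
    · rw [if_neg h1] at h
      by_cases h2 : (C.getD u PySem.Dict.empty).getD v 0 ≠ 0 ∧ c.getD v 0 = c.getD u 0
      · rw [if_pos h2] at h; cases h
      · rw [if_neg h2] at h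
        obtain ⟨ia, ib, ic, id, ie, imu⟩ := ih c q c2 q2 hrest hcu h
        refine ⟨ia, ib, ic, id, ?_, imu⟩
        intro w hw hedgw
        rcases List.mem_cons.mp hw with rfl | hw'
        · have hcw : (C.getD u PySem.Dict.empty).getD w 0 ≠ 0 := (hC u w hu hvK).mpr ⟨hedgw.2.2.1, hedgw.2.2.2⟩
          have hwne : pvCol c w ≠ -1 := fun hcon => h1 ⟨hcw, hcon⟩
          have hwnecu : pvCol c w ≠ pvCol c u := fun hcon => h2 ⟨hcw, hcon⟩
          rw [ia w hwne]
          exact ⟨hwne, hwnecu⟩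
        · exact ie w hw' hedgw

-- the inner pass, conflict case: the graph has an odd closed walk
theorem pvAuxInner_none {G C} (hC : pvAdjOk G C) (hp : Pre_existenDosClanes G)
    {c0 : PySem.Dict Int Int} (hset : pvSettled G c0) {fuente u} (hu : u ∈ pvK G)
    (hu0 : pvCol c0 u = -1) :
    ∀ (vs : List Int) (c : PySem.Dict Int Int) (q : List Int),
    (∀ x ∈ vs, x ∈ pvK G) →
    (pvCol c u = 0 ∨ pvCol c u = 1) →
    (∀ v, pvCol c0 v ≠ -1 → pvCol c v = pvCol c0 v) →
    (∀ v ∈ pvK G, pvCol c0 v = -1 → pvCol c v ≠ -1 →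
      ((pvCol c v = 0 ∨ pvCol c v = 1) ∧ pvWk G v fuente (decide (pvCol c v = 0)))) →
    pvAuxInner C u vs c q = none → ¬ pvBip G := by
  intro vs
  induction vs with
  | nil => intro c q _ _ _ _ h; simp [pvAuxInner] at h
  | cons v rest ih =>
    intro c q hvs hcu hs1 hs3 h
    have hvK : v ∈ pvK G := hvs v (by simp)
    have hrest : ∀ x ∈ rest, x ∈ pvK G := fun x hx => hvs x (by simp [hx])
    simp only [pvAuxInner] at h
    by_cases h1 : (C.getD u PySem.Dict.empty).getD v 0 ≠ 0 ∧ c.getD v 0 = -1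
    · rw [if_pos h1] at h
      have hcv : pvCol c v = -1 := h1.2
      have hvu : v ≠ u := fun he => by
        rw [he] at hcv; rcases hcu with h' | h' <;> rw [h'] at hcv <;> exact absurd hcv (by norm_num)
      have hedg : pvEdg G u v := pvEdg_of_adj hC hu hvK h1.1
      have hc0v : pvCol c0 v = -1 := by
        by_contra hcon
        exact hcon (by rw [← hs1 v hcon]; exact hcv)
      set c' := c.insert v (1 - c.getD u 0) with hc'
      have hcu' : pvCol c' u = pvCol c u := pvCol_insert_ne (Ne.symm hvu)
      have hcv' : pvCol c' v = 1 - pvCol c u := pvCol_insert_self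
      refine ih c' (q ++ [v]) hrest (by rw [hcu']; exact hcu) ?_ ?_ h
      · intro x hx
        have hxv : x ≠ v := fun he => by rw [he, hc0v] at hx; exact hx rfl
        rw [pvCol_insert_ne hxv]; exact hs1 x hx
      · intro x hxK hx0 hx
        by_cases hxv : x = v
        · subst hxv
          have hwu := (hs3 u hu hu0 (by rcases hcu with h' | h' <;> rw [h'] <;> norm_num)).2
          have hvu' := pvEdg_symm hp hedg
          have hwalk := pvWk.cons hvu' hwu
          constructor
          · rw [hcv']; rcases hcu with h' | h' <;> rw [h'] <;> norm_num
          · rw [hcv']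
            rcases hcu with h' | h' <;> rw [h'] at hwalk ⊢ <;> simpa using hwalk
        · rw [pvCol_insert_ne hxv] at hx ⊢
          exact hs3 x hxK hx0 hx
    · rw [if_neg h1] at h
      by_cases h2 : (C.getD u PySem.Dict.empty).getD v 0 ≠ 0 ∧ c.getD v 0 = c.getD u 0
      · -- conflict: same color on both ends of a complement edge
        intro hbip
        have hedg : pvEdg G u v := pvEdg_of_adj hC hu hvK h2.1
        have hcvcu : pvCol c v = pvCol c u := h2.2
        have hc0v : pvCol c0 v = -1 := by
          by_contra hcon
          exact ((hset v hvK hcon).2 u (pvEdg_symm hp hedg)).1 hu0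
        have hwv := hs3 v hvK hc0v (by rw [hcvcu]; rcases hcu with h' | h' <;> rw [h'] <;> norm_num)
        have hwu := hs3 u hu hu0 (by rcases hcu with h' | h' <;> rw [h'] <;> norm_num)
        have hpar : decide (pvCol c v = 0) = decide (pvCol c u = 0) := by rw [hcvcu]
        have hodd : pvWk G u u true := pvOdd_of_conflict hp hwu.2 (hpar ▸ hwv.2) hedg
        exact pvBip_no_odd hbip hodd
      · rw [if_neg h2] at h
        exact ih c q hrest hcu hs1 hs3 h

-- BFS session invariant (c0 = colors at session start, fuente = current BFS root)
def pvSInv (G : List (Int × List (Int × Int))) (c0 : PySem.Dict Int Int) (fuente : Int)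
    (c : PySem.Dict Int Int) (q : List Int) : Prop :=
  (∀ v, pvCol c0 v ≠ -1 → pvCol c v = pvCol c0 v) ∧
  (∀ v ∈ q, v ∈ pvK G ∧ (pvCol c v = 0 ∨ pvCol c v = 1) ∧ pvCol c0 v = -1) ∧
  (∀ v ∈ pvK G, pvCol c0 v = -1 → pvCol c v ≠ -1 →
    ((pvCol c v = 0 ∨ pvCol c v = 1) ∧ pvWk G v fuente (decide (pvCol c v = 0)))) ∧
  (∀ v ∈ pvK G, pvCol c0 v = -1 → pvCol c v ≠ -1 → v ∉ q →
    ∀ w, pvEdg G v w → pvCol c w ≠ -1 ∧ pvCol c w ≠ pvCol c v)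

theorem pvAuxLoop_spec {G C} (hC : pvAdjOk G C) (hp : Pre_existenDosClanes G)
    {c0} (hset : pvSettled G c0) {fuente} :
    ∀ (fuel : Nat) (c : PySem.Dict Int Int) (q : List Int),
    q.length + 2 * pvCnt G c < fuel →
    pvSInv G c0 fuente c q →
    ((pvAuxLoop C (pvK G) c q fuel).1 = true →
       ((∀ v, pvCol c v ≠ -1 → pvCol (pvAuxLoop C (pvK G) c q fuel).2 v = pvCol c v) ∧
        pvSettled G (pvAuxLoop C (pvK G) c q fuel).2)) ∧
    ((pvAuxLoop C (pvK G) c q fuel).1 = false → ¬ pvBip G) := by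
  intro fuel
  induction fuel with
  | zero => intro c q hmu _; omega
  | succ fuel ih =>
    intro c q hmu hinv
    obtain ⟨hs1, hs2, hs3, hs4⟩ := hinv
    cases q with
    | nil =>
      have hred : pvAuxLoop C (pvK G) c [] (fuel + 1) = (true, c) := rfl
      rw [hred]
      refine ⟨fun _ => ⟨fun v _ => rfl, ?_⟩, fun h => by simp at h⟩
      intro v hvK hcv
      by_cases h0 : pvCol c0 v = -1
      · exact ⟨(hs3 v hvK h0 hcv).1, fun w hw => hs4 v hvK h0 hcv (by simp) w hw⟩
      · have hvc := hs1 v h0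
        obtain ⟨hcols, hnb⟩ := hset v hvK h0
        refine ⟨by rw [hvc]; exact hcols, fun w hw => ?_⟩
        obtain ⟨hw1, hw2⟩ := hnb w hw
        rw [hs1 w hw1, hvc]
        exact ⟨hw1, hw2⟩
    | cons u q' =>
      obtain ⟨huK, hcu, hu0⟩ := hs2 u (by simp)
      rcases hin : pvAuxInner C u (pvK G) c q' with _ | ⟨c2, q2⟩
      · have hred : pvAuxLoop C (pvK G) c (u :: q') (fuel + 1) = (false, c) := by
          simp only [pvAuxLoop, hin]
        rw [hred]
        refine ⟨fun h => by simp at h, fun _ => ?_⟩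
        exact pvAuxInner_none hC hp hset huK hu0 (pvK G) c q' (fun x hx => hx) hcu hs1 hs3 hin
      · have hred : pvAuxLoop C (pvK G) c (u :: q') (fuel + 1) = pvAuxLoop C (pvK G) c2 q2 fuel := by
          simp only [pvAuxLoop, hin]
        rw [hred]
        obtain ⟨ia, ib, ic, id, ie, imu⟩ :=
          pvAuxInner_some hC huK (pvK G) c q' c2 q2 (fun x hx => hx) hcu hin
        have hcu2 : pvCol c2 u = pvCol c u := ia u (by rcases hcu with h' | h' <;> rw [h'] <;> norm_num)
        have hnew_c0 : ∀ v, pvCol c v = -1 → pvCol c0 v = -1 := by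
          intro v hv
          by_contra hcon
          rw [hs1 v hcon] at hv
          exact hcon hv
        have hinv2 : pvSInv G c0 fuente c2 q2 := by
          refine ⟨?_, ?_, ?_, ?_⟩
          · intro v hv
            rw [ia v (by rw [hs1 v hv]; exact hv), hs1 v hv]
          · intro v hv
            rcases id v hv with hq' | ⟨hnv, hnv2⟩
            · obtain ⟨h1', h2', h3'⟩ := hs2 v (by simp [hq'])
              exact ⟨h1', by rw [ia v (by rcases h2' with h' | h' <;> rw [h'] <;> norm_num)]; exact h2', h3'⟩
            · obtain ⟨_, hvK, hval, hedg⟩ := ic v hnv hnv2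
              refine ⟨hvK, ?_, hnew_c0 v hnv⟩
              rw [hval]
              rcases hcu with h' | h' <;> rw [h'] <;> norm_num
          · intro v hvK h0 hcv2
            by_cases hcv : pvCol c v = -1
            · obtain ⟨_, _, hval, hedg⟩ := ic v hcv hcv2
              have hwu := hs3 u huK hu0 (by rcases hcu with h' | h' <;> rw [h'] <;> norm_num)
              have hwalk := pvWk.cons (pvEdg_symm hp hedg) hwu.2
              constructor
              · rw [hval]; rcases hcu with h' | h' <;> rw [h'] <;> norm_num
              · rw [hval]
                rcases hcu with h' | h' <;> rw [h'] at hwalk ⊢ <;> simpa using hwalk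
            · obtain ⟨hcols, hwalk⟩ := hs3 v hvK h0 hcv
              rw [ia v hcv]
              exact ⟨hcols, hwalk⟩
          · intro v hvK h0 hcv2 hvq2 w hw
            by_cases hcv : pvCol c v = -1
            · exact absurd (ic v hcv hcv2).1 hvq2
            · by_cases hvq : v ∈ q'
              · exact absurd (ib v hvq) hvq2
              · by_cases hvu : v = u
                · subst hvu
                  have := ie w hw.2.1 hw
                  rw [hcu2]
                  exact this
                · have := hs4 v hvK h0 hcv (by simp [hvq, hvu]) w hw
                  rw [ia w this.1, ia v hcv]
                  exact this
        have hmu2 : q2.length + 2 * pvCnt G c2 < fuel := by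
          simp only [List.length_cons] at hmu
          omega
        obtain ⟨iht, ihf⟩ := ih c2 q2 hmu2 hinv2
        refine ⟨fun h => ?_, ihf⟩
        obtain ⟨ihp, ihs⟩ := iht h
        refine ⟨fun v hv => ?_, ihs⟩
        rw [ihp v (by rw [ia v hv]; exact hv), ia v hv]

theorem pvSession_spec {G C} (hC : pvAdjOk G C) (hp : Pre_existenDosClanes G)
    {c} (hset : pvSettled G c) {fuente} (hfK : fuente ∈ pvK G)
    (hfc : pvCol c fuente = -1) (hkeys : C.keys = pvK G) :
    ((pvEsBipartitaAux C fuente c).1 = true →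
      ((∀ v, pvCol c v ≠ -1 → pvCol (pvEsBipartitaAux C fuente c).2 v = pvCol c v) ∧
       pvCol (pvEsBipartitaAux C fuente c).2 fuente ≠ -1 ∧
       pvSettled G (pvEsBipartitaAux C fuente c).2)) ∧
    ((pvEsBipartitaAux C fuente c).1 = false → ¬ pvBip G) := by
  have hrw : pvEsBipartitaAux C fuente c
      = pvAuxLoop C (pvK G) (c.insert fuente 1) [fuente] (pvAuxFuel (pvK G)) := by
    simp only [pvEsBipartitaAux, hkeys]
  have hc1f : pvCol (c.insert fuente 1) fuente = 1 := pvCol_insert_self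
  have honly : ∀ v, v ≠ fuente → pvCol (c.insert fuente 1) v = pvCol c v :=
    fun v hv => pvCol_insert_ne hv
  have hinv : pvSInv G c fuente (c.insert fuente 1) [fuente] := by
    refine ⟨?_, ?_, ?_, ?_⟩
    · intro v hv
      have hvf : v ≠ fuente := fun he => hv (he ▸ hfc)
      exact honly v hvf
    · intro v hv
      simp at hv; subst hv
      exact ⟨hfK, Or.inr hc1f, hfc⟩
    · intro v hvK h0 hcv
      by_cases hvf : v = fuente
      · subst hvf
        rw [hc1f]
        exact ⟨Or.inr rfl, by simpa using pvWk.nil _⟩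
      · rw [honly v hvf] at hcv
        exact absurd h0 hcv
    · intro v hvK h0 hcv hvq
      by_cases hvf : v = fuente
      · subst hvf; simp at hvq
      · rw [honly v hvf] at hcv
        exact absurd h0 hcv
  have hmu : ([fuente] : List Int).length + 2 * pvCnt G (c.insert fuente 1) < pvAuxFuel (pvK G) := by
    have hle : pvCnt G (c.insert fuente 1) ≤ (pvK G).length := List.countP_le_length
    simp only [List.length_cons, List.length_nil, pvAuxFuel]
    omega
  obtain ⟨ht, hf⟩ := pvAuxLoop_spec hC hp hset (pvAuxFuel (pvK G)) (c.insert fuente 1) [fuente] hmu hinv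
  rw [hrw]
  refine ⟨fun h => ?_, hf⟩
  obtain ⟨hpres, hs⟩ := ht h
  refine ⟨fun v hv => ?_, ?_, hs⟩
  · have hvf : v ≠ fuente := fun he => hv (he ▸ hfc)
    rw [hpres v (by rw [honly v hvf]; exact hv), honly v hvf]
  · rw [hpres fuente (by rw [hc1f]; norm_num), hc1f]
    norm_num

theorem pvOuterLoop_spec {G C} (hC : pvAdjOk G C) (hp : Pre_existenDosClanes G)
    (hkeys : C.keys = pvK G) :
    ∀ (rest : List Int) (c), (∀ x ∈ rest, x ∈ pvK G) → pvSettled G c →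
    (∀ v ∈ pvK G, v ∉ rest → pvCol c v ≠ -1) →
    ((pvEsBipartitaLoop C rest c = true → pvBip G) ∧
     (pvEsBipartitaLoop C rest c = false → ¬ pvBip G)) := by
  intro rest
  induction rest with
  | nil =>
    intro c _ hset hall
    simp only [pvEsBipartitaLoop]
    refine ⟨fun _ => ⟨fun v => decide (pvCol c v = 1), ?_⟩, fun h => by cases h⟩
    intro i j hedg
    have hiK := hedg.1
    have hjK := hedg.2.1
    have hi := hset i hiK (hall i hiK (by simp))
    have hj := hset j hjK (hall j hjK (by simp))
    obtain ⟨hji, hjne⟩ := hi.2 j hedg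
    rcases hi.1 with h1 | h1 <;> rcases hj.1 with h2 | h2 <;>
      simp [h1, h2] <;> rw [h1, h2] at hjne <;> simp at hjne
  | cons i rest ih =>
    intro c hrest hset hall
    have hiK : i ∈ pvK G := hrest i (by simp)
    by_cases hci : c.getD i 0 = -1
    · obtain ⟨ht, hf⟩ := pvSession_spec hC hp hset hiK hci hkeys
      rcases haux : pvEsBipartitaAux C i c with ⟨b, c'⟩
      cases b
      · have hred : pvEsBipartitaLoop C (i :: rest) c = false := by
          simp only [pvEsBipartitaLoop, if_pos hci, haux]
        rw [hred]
        exact ⟨fun h => by simp at h, fun _ => hf (by rw [haux])⟩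
      · have hred : pvEsBipartitaLoop C (i :: rest) c = pvEsBipartitaLoop C rest c' := by
          simp only [pvEsBipartitaLoop, if_pos hci, haux]
        rw [hred]
        obtain ⟨hpres, hfcol, hset'⟩ := ht (by rw [haux])
        rw [haux] at hpres hfcol hset'
        refine ih c' (fun x hx => hrest x (by simp [hx])) hset' ?_
        intro v hvK hvr
        by_cases hvi : v = i
        · subst hvi; exact hfcol
        · have := hall v hvK (by simp [hvr, hvi])
          rw [hpres v this]
          exact this
    · have hred : pvEsBipartitaLoop C (i :: rest) c = pvEsBipartitaLoop C rest c := by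
        simp only [pvEsBipartitaLoop, if_neg hci]
      rw [hred]
      refine ih c (fun x hx => hrest x (by simp [hx])) hset ?_
      intro v hvK hvr
      by_cases hvi : v = i
      · subst hvi; exact hci
      · exact hall v hvK (by simp [hvr, hvi])

-- ---- B side: parity union-find (quick-find) is a bipartiteness decision ----

-- every vertex has a parity-tagged walk to its class representative, parity in {0, 1}
def pvBInv (G : List (Int × List (Int × Int))) (m : PySem.Dict Int (Int × Int)) : Prop :=
  ∀ v ∈ pvK G, ((m.getD v (0, 0)).2 = 0 ∨ (m.getD v (0, 0)).2 = 1) ∧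
    pvWk G v (m.getD v (0, 0)).1 (decide ((m.getD v (0, 0)).2 = 1))

-- a processed complement edge: same class, opposite parities
def pvRel (m : PySem.Dict Int (Int × Int)) (i j : Int) : Prop :=
  (m.getD i (0, 0)).1 = (m.getD j (0, 0)).1 ∧ (m.getD i (0, 0)).2 ≠ (m.getD j (0, 0)).2

theorem pvRelabel_getD {ri rj d : Int} :
    ∀ (ks : List Int), ks.Nodup → ∀ (m : PySem.Dict Int (Int × Int)) (v : Int),
    (ks.foldl (fun c v => if (c.getD v (0, 0)).1 = rj then
        c.insert v (ri, PySem.Int.mod ((c.getD v (0, 0)).2 + d) 2) else c) m).getD v (0, 0)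
      = if v ∈ ks ∧ (m.getD v (0, 0)).1 = rj
          then (ri, PySem.Int.mod ((m.getD v (0, 0)).2 + d) 2)
          else m.getD v (0, 0) := by
  intro ks
  induction ks with
  | nil => intro _ m v; simp
  | cons k rest ih =>
    intro hnd m v
    have hkr : k ∉ rest := (List.nodup_cons.mp hnd).1
    simp only [List.foldl]
    by_cases hk : (m.getD k (0, 0)).1 = rj
    · rw [if_pos hk, ih (List.nodup_cons.mp hnd).2]
      by_cases hvk : v = k
      · subst hvk
        simp [hkr, hk]
      · simp only [PySem.Dict.getD_insert, if_neg hvk, List.mem_cons]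
        by_cases hvr : v ∈ rest
        · simp [hvr]
        · simp [hvr, hvk]
    · rw [if_neg hk, ih (List.nodup_cons.mp hnd).2]
      by_cases hvk : v = k
      · subst hvk
        simp [hkr, hk]
      · simp [hvk]

-- the inner `for j in keys` loop of B
theorem pvLoopJ_spec {G D} (hp : Pre_existenDosClanes G)
    (hD : ∀ a b, (D.getD a PySem.Dict.empty).getD b 0 = pvRawAdj G a b) {i} (hiK : i ∈ pvK G) :
    ∀ (js : List Int) (m : PySem.Dict Int (Int × Int)),
    (∀ x ∈ js, x ∈ pvK G) → pvBInv G m →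
    (pvAltLoopJ D (pvK G) i js m = none → ¬ pvBip G) ∧
    (∀ m', pvAltLoopJ D (pvK G) i js m = some m' →
      pvBInv G m' ∧
      (∀ a b, a ∈ pvK G → b ∈ pvK G → pvRel m a b → pvRel m' a b) ∧
      (∀ j ∈ js, pvEdg G i j → pvRel m' i j)) := by
  intro js
  induction js with
  | nil =>
    intro m _ hB
    refine ⟨fun h => by simp [pvAltLoopJ] at h, fun m' h => ?_⟩
    simp only [pvAltLoopJ, Option.some.injEq] at h
    subst h
    exact ⟨hB, fun a b _ _ hr => hr, by simp⟩
  | cons j rest ih =>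
    intro m hjs hB
    have hjK : j ∈ pvK G := hjs j (by simp)
    have hrest : ∀ x ∈ rest, x ∈ pvK G := fun x hx => hjs x (by simp [hx])
    by_cases hg : i ≠ j ∧ (D.getD i PySem.Dict.empty).getD j 0 = 0
    · have hedg : pvEdg G i j := ⟨hiK, hjK, hg.1, by rw [← hD i j]; exact hg.2⟩
      obtain ⟨hpi, hwi⟩ := hB i hiK
      obtain ⟨hpj, hwj⟩ := hB j hjK
      by_cases hrr : (m.getD i (0, 0)).1 = (m.getD j (0, 0)).1
      · by_cases hpp : (m.getD i (0, 0)).2 = (m.getD j (0, 0)).2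
        · -- conflict: Python returns False
          have hred : pvAltLoopJ D (pvK G) i (j :: rest) m = none := by
            simp only [pvAltLoopJ, if_pos hg, if_pos hrr, if_pos hpp]
          refine ⟨fun _ hbip => ?_, fun m' h => by rw [hred] at h; cases h⟩
          have hwj' : pvWk G j (m.getD i (0, 0)).1 (decide ((m.getD i (0, 0)).2 = 1)) := by
            rw [hrr, hpp]; exact hwj
          exact pvBip_no_odd hbip (pvOdd_of_conflict hp hwi hwj' hedg)
        · have hred : pvAltLoopJ D (pvK G) i (j :: rest) m = pvAltLoopJ D (pvK G) i rest m := by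
            simp only [pvAltLoopJ, if_pos hg, if_pos hrr, if_neg hpp]
          rw [hred]
          obtain ⟨ihn, ihs⟩ := ih m hrest hB
          refine ⟨ihn, fun m' h => ?_⟩
          obtain ⟨hB', hpres, hrel⟩ := ihs m' h
          refine ⟨hB', hpres, fun x hx he => ?_⟩
          rcases List.mem_cons.mp hx with rfl | hx'
          · exact hpres _ _ hiK hjK ⟨hrr, hpp⟩
          · exact hrel x hx' he
      · -- union: relabel the whole class of j's representative
        have hred : pvAltLoopJ D (pvK G) i (j :: rest) m
            = pvAltLoopJ D (pvK G) i rest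
                ((pvK G).foldl (fun c v => if (c.getD v (0, 0)).1 = (m.getD j (0, 0)).1 then
                    c.insert v ((m.getD i (0, 0)).1,
                      PySem.Int.mod ((c.getD v (0, 0)).2
                        + PySem.Int.mod ((m.getD i (0, 0)).2 + (m.getD j (0, 0)).2 + 1) 2) 2)
                  else c) m) := by
          simp only [pvAltLoopJ, if_pos hg, if_neg hrr]
        rw [hred]
        have hget : ∀ v, (((pvK G).foldl (fun c v => if (c.getD v (0, 0)).1 = (m.getD j (0, 0)).1 then
                    c.insert v ((m.getD i (0, 0)).1,
                      PySem.Int.mod ((c.getD v (0, 0)).2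
                        + PySem.Int.mod ((m.getD i (0, 0)).2 + (m.getD j (0, 0)).2 + 1) 2) 2)
                  else c) m).getD v (0, 0))
            = if v ∈ pvK G ∧ (m.getD v (0, 0)).1 = (m.getD j (0, 0)).1
                then ((m.getD i (0, 0)).1,
                  PySem.Int.mod ((m.getD v (0, 0)).2
                    + PySem.Int.mod ((m.getD i (0, 0)).2 + (m.getD j (0, 0)).2 + 1) 2) 2)
                else m.getD v (0, 0) :=
          fun v => pvRelabel_getD (pvK G) hp.1 m v
        have hwji : pvWk G (m.getD j (0, 0)).1 (m.getD i (0, 0)).1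
            (((decide ((m.getD j (0, 0)).2 = 1)) ^^ true) ^^ (decide ((m.getD i (0, 0)).2 = 1))) :=
          pvWk_trans (pvWk_trans (pvWk_symm hp hwj)
            (by simpa using pvWk.cons (pvEdg_symm hp hedg) (pvWk.nil i))) hwi
        have hB1 : pvBInv G ((pvK G).foldl (fun c v => if (c.getD v (0, 0)).1 = (m.getD j (0, 0)).1 then
                    c.insert v ((m.getD i (0, 0)).1,
                      PySem.Int.mod ((c.getD v (0, 0)).2
                        + PySem.Int.mod ((m.getD i (0, 0)).2 + (m.getD j (0, 0)).2 + 1) 2) 2)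
                  else c) m) := by
          intro v hv
          obtain ⟨hpv, hwv⟩ := hB v hv
          rw [hget v]
          by_cases h : (m.getD v (0, 0)).1 = (m.getD j (0, 0)).1
          · rw [if_pos ⟨hv, h⟩]
            have hw2 : pvWk G v (m.getD i (0, 0)).1
                ((decide ((m.getD v (0, 0)).2 = 1))
                  ^^ (((decide ((m.getD j (0, 0)).2 = 1)) ^^ true) ^^ (decide ((m.getD i (0, 0)).2 = 1)))) :=
              pvWk_trans (by rw [← h]; exact hwv) hwji
            constructor
            · rcases hpv with h1 | h1 <;> rcases hpi with h2 | h2 <;> rcases hpj with h3 | h3 <;>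
                (dsimp only; simp only [h1, h2, h3]; decide)
            · have hpeq : decide ((((m.getD i (0, 0)).1,
                  PySem.Int.mod ((m.getD v (0, 0)).2
                    + PySem.Int.mod ((m.getD i (0, 0)).2 + (m.getD j (0, 0)).2 + 1) 2) 2) : Int × Int).2 = 1)
                  = ((decide ((m.getD v (0, 0)).2 = 1))
                    ^^ (((decide ((m.getD j (0, 0)).2 = 1)) ^^ true) ^^ (decide ((m.getD i (0, 0)).2 = 1)))) := by
                rcases hpv with h1 | h1 <;> rcases hpi with h2 | h2 <;> rcases hpj with h3 | h3 <;>
                  (dsimp only; simp only [h1, h2, h3]; decide)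
              rw [hpeq]
              exact hw2
          · rw [if_neg (fun hc => h hc.2)]
            exact ⟨hpv, hwv⟩
        have hRel1 : ∀ a b, a ∈ pvK G → b ∈ pvK G → pvRel m a b →
            pvRel ((pvK G).foldl (fun c v => if (c.getD v (0, 0)).1 = (m.getD j (0, 0)).1 then
                    c.insert v ((m.getD i (0, 0)).1,
                      PySem.Int.mod ((c.getD v (0, 0)).2
                        + PySem.Int.mod ((m.getD i (0, 0)).2 + (m.getD j (0, 0)).2 + 1) 2) 2)
                  else c) m) a b := by
          intro a b ha hb hrab
          obtain ⟨hr, hpne⟩ := hrab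
          obtain ⟨hpa, _⟩ := hB a ha
          obtain ⟨hpb, _⟩ := hB b hb
          unfold pvRel
          rw [hget a, hget b]
          by_cases h : (m.getD a (0, 0)).1 = (m.getD j (0, 0)).1
          · rw [if_pos ⟨ha, h⟩, if_pos ⟨hb, by rw [← hr]; exact h⟩]
            refine ⟨rfl, ?_⟩
            rcases hpa with h1 | h1 <;> rcases hpb with h2 | h2 <;> rcases hpi with h3 | h3 <;>
              rcases hpj with h4 | h4 <;>
              first
                | (exfalso; exact hpne (h1.trans h2.symm))
                | (dsimp only; simp only [h1, h2, h3, h4]; decide)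
          · rw [if_neg (fun hc => h hc.2), if_neg (fun hc => h (hr.trans hc.2))]
            exact ⟨hr, hpne⟩
        have hRelij : pvRel ((pvK G).foldl (fun c v => if (c.getD v (0, 0)).1 = (m.getD j (0, 0)).1 then
                    c.insert v ((m.getD i (0, 0)).1,
                      PySem.Int.mod ((c.getD v (0, 0)).2
                        + PySem.Int.mod ((m.getD i (0, 0)).2 + (m.getD j (0, 0)).2 + 1) 2) 2)
                  else c) m) i j := by
          unfold pvRel
          rw [hget i, hget j, if_neg (fun hc => hrr hc.2), if_pos ⟨hjK, rfl⟩]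
          refine ⟨rfl, ?_⟩
          rcases hpi with h1 | h1 <;> rcases hpj with h2 | h2 <;>
            (dsimp only; simp only [h1, h2]; decide)
        obtain ⟨ihn, ihs⟩ := ih _ hrest hB1
        refine ⟨ihn, fun m' h => ?_⟩
        obtain ⟨hB', hpres, hrel⟩ := ihs m' h
        refine ⟨hB', fun a b ha hb hr => hpres a b ha hb (hRel1 a b ha hb hr), fun x hx he => ?_⟩
        rcases List.mem_cons.mp hx with rfl | hx'
        · exact hpres _ _ hiK hjK hRelij
        · exact hrel x hx' he
    · have hred : pvAltLoopJ D (pvK G) i (j :: rest) m = pvAltLoopJ D (pvK G) i rest m := by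
        simp only [pvAltLoopJ, if_neg hg]
      rw [hred]
      obtain ⟨ihn, ihs⟩ := ih m hrest hB
      refine ⟨ihn, fun m' h => ?_⟩
      obtain ⟨hB', hpres, hrel⟩ := ihs m' h
      refine ⟨hB', hpres, fun x hx he => ?_⟩
      rcases List.mem_cons.mp hx with rfl | hx'
      · exact absurd ⟨he.2.2.1, by rw [hD i x]; exact he.2.2.2⟩ hg
      · exact hrel x hx' he

theorem pvLoopI_spec {G D} (hp : Pre_existenDosClanes G)
    (hD : ∀ a b, (D.getD a PySem.Dict.empty).getD b 0 = pvRawAdj G a b) :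
    ∀ (is : List Int) (m : PySem.Dict Int (Int × Int)),
    (∀ x ∈ is, x ∈ pvK G) → pvBInv G m →
    (pvAltLoopI D (pvK G) is m = none → ¬ pvBip G) ∧
    (∀ m', pvAltLoopI D (pvK G) is m = some m' →
      pvBInv G m' ∧
      (∀ a b, a ∈ pvK G → b ∈ pvK G → pvRel m a b → pvRel m' a b) ∧
      (∀ x ∈ is, ∀ j ∈ pvK G, pvEdg G x j → pvRel m' x j)) := by
  intro is
  induction is with
  | nil =>
    intro m _ hB
    refine ⟨fun h => by simp [pvAltLoopI] at h, fun m' h => ?_⟩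
    simp only [pvAltLoopI, Option.some.injEq] at h
    subst h
    exact ⟨hB, fun a b _ _ hr => hr, by simp⟩
  | cons x rest ih =>
    intro m his hB
    have hxK : x ∈ pvK G := his x (by simp)
    have hrest : ∀ y ∈ rest, y ∈ pvK G := fun y hy => his y (by simp [hy])
    obtain ⟨hjn, hjs⟩ := pvLoopJ_spec hp hD hxK (pvK G) m (fun y hy => hy) hB
    cases hJ : pvAltLoopJ D (pvK G) x (pvK G) m with
    | none =>
      have hred : pvAltLoopI D (pvK G) (x :: rest) m = none := by
        simp only [pvAltLoopI, hJ]
      rw [hred]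
      exact ⟨fun _ => hjn hJ, fun m' h => by cases h⟩
    | some m1 =>
      have hred : pvAltLoopI D (pvK G) (x :: rest) m = pvAltLoopI D (pvK G) rest m1 := by
        simp only [pvAltLoopI, hJ]
      rw [hred]
      obtain ⟨hB1, hpres1, hrel1⟩ := hjs m1 hJ
      obtain ⟨ihn, ihs⟩ := ih m1 hrest hB1
      refine ⟨ihn, fun m' h => ?_⟩
      obtain ⟨hB', hpres, hrel⟩ := ihs m' h
      refine ⟨hB', fun a b ha hb hr => hpres a b ha hb (hpres1 a b ha hb hr), fun y hy => ?_⟩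
      rcases List.mem_cons.mp hy with rfl | hy'
      · intro j hj he
        exact hpres _ _ hxK hj (hrel1 j hj he)
      · exact hrel y hy'

-- ---- both ports against the abstract bipartiteness predicate ----

theorem pvB_spec (G : List (Int × List (Int × Int))) (hp : Pre_existenDosClanes G) :
    (existenDosClanes_alt G = true → pvBip G) ∧
    (existenDosClanes_alt G = false → ¬ pvBip G) := by
  have hk0 : (pvToDict G).keys = pvK G := pvKeys_toDict G hp.1
  have hD : ∀ a b, ((pvToDict G).getD a PySem.Dict.empty).getD b 0 = pvRawAdj G a b :=
    pvAdjD_eq_rawAdj G hp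
  have hunf : existenDosClanes_alt G = (match pvAltLoopI (pvToDict G) (pvK G) (pvK G)
      ((pvK G).foldl (fun c v => c.insert v ((v, 0) : Int × Int)) PySem.Dict.empty) with
    | none => false
    | some _ => true) := by
    simp only [existenDosClanes_alt, hk0]
  have hcomp0 : ∀ v, (((pvK G).foldl (fun c v => c.insert v ((v, 0) : Int × Int))
      PySem.Dict.empty).getD v (0, 0)) = if v ∈ pvK G then (v, 0) else (0, 0) := by
    intro v
    rw [pvFoldInsert_getD (pvK G) (fun v => ((v, 0) : Int × Int)) PySem.Dict.empty (0, 0) v]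
    simp
  have hB0 : pvBInv G ((pvK G).foldl (fun c v => c.insert v ((v, 0) : Int × Int)) PySem.Dict.empty) := by
    intro v hv
    rw [hcomp0 v, if_pos hv]
    exact ⟨Or.inl rfl, by simpa using pvWk.nil v⟩
  obtain ⟨hn, hs⟩ := pvLoopI_spec hp hD (pvK G) _ (fun y hy => hy) hB0
  rw [hunf]
  cases hI : pvAltLoopI (pvToDict G) (pvK G) (pvK G)
      ((pvK G).foldl (fun c v => c.insert v ((v, 0) : Int × Int)) PySem.Dict.empty) with
  | none =>
    exact ⟨fun h => by simp at h, fun _ => hn hI⟩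
  | some m' =>
    refine ⟨fun _ => ?_, fun h => by simp at h⟩
    obtain ⟨hB', _, hrel⟩ := hs m' hI
    refine ⟨fun v => decide ((m'.getD v (0, 0)).2 = 1), ?_⟩
    intro a b he
    have haK := he.1
    have hbK := he.2.1
    obtain ⟨hreq, hpne⟩ := hrel a haK b hbK he
    obtain ⟨hpa, _⟩ := hB' a haK
    obtain ⟨hpb, _⟩ := hB' b hbK
    rcases hpa with h1 | h1 <;> rcases hpb with h2 | h2 <;>
      first
        | (exfalso; exact hpne (h1.trans h2.symm))
        | (dsimp only; simp only [h1, h2]; decide)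
-- the complement dict A builds (the let-chain of the port, zeta-reduced)
def pvC2 (G : List (Int × List (Int × Int))) : PySem.Dict Int (PySem.Dict Int Int) :=
  (pvToDict G).keys.foldl (fun C i => (pvToDict G).keys.foldl
      (fun C j => C.insert i ((C.getD i PySem.Dict.empty).insert j
        (if i ≠ j then (if ((pvToDict G).getD i PySem.Dict.empty).getD j 0 = 0 then 1 else 0) else 0))) C)
    ((pvToDict G).keys.foldl (fun C u => (pvToDict G).keys.foldl
      (fun C v => C.insert u ((C.getD u PySem.Dict.empty).insert v 0)) C) (pvToDict G))

theorem pvA_unfold (G : List (Int × List (Int × Int))) :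
    existenDosClanes G = pvEsBipartita (pvC2 G) := rfl

theorem pvC2_keys (G : List (Int × List (Int × Int))) (hp : Pre_existenDosClanes G) :
    (pvC2 G).keys = pvK G := by
  have hk0 : (pvToDict G).keys = pvK G := pvKeys_toDict G hp.1
  have h1 : ((pvToDict G).keys.foldl (fun C u => (pvToDict G).keys.foldl
      (fun C v => C.insert u ((C.getD u PySem.Dict.empty).insert v 0)) C) (pvToDict G)).keys
      = (pvToDict G).keys := by
    refine pvPass_keys _ _ (fun _ _ => 0) _ ?_
    intro a ha
    rw [PySem.Dict.contains_iff_mem_keys]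
    exact ha
  rw [pvC2]
  rw [pvPass_keys _ _ _ _ (fun a ha => by
    rw [PySem.Dict.contains_iff_mem_keys, h1]; exact ha), h1, hk0]

theorem pvC2_adjOk (G : List (Int × List (Int × Int))) (hp : Pre_existenDosClanes G) :
    pvAdjOk G (pvC2 G) := by
  have hk0 : (pvToDict G).keys = pvK G := pvKeys_toDict G hp.1
  intro a b ha hb
  have hval : (((pvC2 G).getD a PySem.Dict.empty).getD b 0)
      = (if a ≠ b then (if ((pvToDict G).getD a PySem.Dict.empty).getD b 0 = 0 then 1 else 0) else 0) := by
    rw [pvC2]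
    exact pvPass_getD _ _ _ _ a b (by rw [hk0]; exact hp.1) (by rw [hk0]; exact ha) (by rw [hk0]; exact hb)
  rw [hval, pvAdjD_eq_rawAdj G hp]
  by_cases hab : a = b
  · simp [hab]
  · by_cases hz : pvRawAdj G a b = 0
    · simp [hab, hz]
    · simp [hab, hz]

theorem pvA_spec (G : List (Int × List (Int × Int))) (hp : Pre_existenDosClanes G) :
    (existenDosClanes G = true → pvBip G) ∧
    (existenDosClanes G = false → ¬ pvBip G) := by
  have hkeys : (pvC2 G).keys = pvK G := pvC2_keys G hp
  have hC : pvAdjOk G (pvC2 G) := pvC2_adjOk G hp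
  have hunf : existenDosClanes G = pvEsBipartitaLoop (pvC2 G) (pvK G)
      ((pvK G).foldl (fun c i => c.insert i (-1 : Int)) PySem.Dict.empty) := by
    rw [pvA_unfold]
    simp only [pvEsBipartita, hkeys]
  have hcol0 : ∀ v, pvCol ((pvK G).foldl (fun c i => c.insert i (-1 : Int)) PySem.Dict.empty) v
      = if v ∈ pvK G then -1 else 0 := by
    intro v
    rw [pvCol, pvFoldInsert_getD (pvK G) (fun _ => (-1 : Int)) PySem.Dict.empty 0 v]
    simp
  have hset : pvSettled G ((pvK G).foldl (fun c i => c.insert i (-1 : Int)) PySem.Dict.empty) := by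
    intro v hv hne
    rw [hcol0 v, if_pos hv] at hne
    exact absurd rfl hne
  have hall : ∀ v ∈ pvK G, v ∉ pvK G →
      pvCol ((pvK G).foldl (fun c i => c.insert i (-1 : Int)) PySem.Dict.empty) v ≠ -1 :=
    fun v hv hnv => absurd hv hnv
  obtain ⟨ht, hf⟩ := pvOuterLoop_spec hC hp hkeys (pvK G) _ (fun x hx => hx) hset hall
  rw [hunf]
  exact ⟨ht, hf⟩

-- ===== VERDICT (by name: the statement is the Claim_ definition above) =====
theorem existenDosClanes_spec : Claim_equal_existenDosClanes := by
  intro G _hdom hpre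
  unfold Spec_existenDosClanes
  obtain ⟨hAt, hAf⟩ := pvA_spec G hpre
  obtain ⟨hBt, hBf⟩ := pvB_spec G hpre
  cases hA : existenDosClanes G <;> cases hB : existenDosClanes_alt G
  · rfl
  · exact absurd (hBt hB) (hAf hA)
  · exact absurd (hAt hA) (hBf hB)
  · rfl
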